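-- pv_equiv track=rewrite | github.com/soyukke/lean-unsolved | scripts/collatz_ord3k_deep_implications.py | compute_Ck_3adic
-- ===== SOURCE A (Python) =====
-- def compute_Ck_3adic(js, max_k):
--     """v2 sequence js に対する C_k の3-adic桁を計算"""
--     k = len(js)
--     if k > max_k:
--         k = max_k
--         js = js[:k]
--
--     digits = []
--     for i in range(1, k+1):
--         S_i = sum(js[k-i:k])
--         # i番目の項: 3^{i-1} * 2^{-S_i}
--         # 3-adic桁 = 2^{-S_i} mod 3
--         digit = pow(2, -S_i, 3)
--         digits.append(digit)
--
--     return digits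
-- ===== SOURCE B (Python) =====
-- def compute_Ck_3adic(js, max_k):
--     """v2 sequence js に対する C_k の3-adic桁を計算 (one pass over a running suffix sum)"""
--     k = min(len(js), max_k)
--     if k < 0:
--         k = 0
--     digits = []
--     s = 0
--     for x in reversed(js[:k]):
--         s += x
--         digits.append(1 if s % 2 == 0 else 2)
--     return digits
-- ===== Notes on version B (the rewrite author's own statement) =====
-- stated objective: faster
-- what changed: replaces the per-index recomputation of each suffix sum (sum(js[k-i:k]) for every i) by a single reverse pass that extends one running suffix sum, emitting each 3-adic digit from the sum's parity
import Mathlib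
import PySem

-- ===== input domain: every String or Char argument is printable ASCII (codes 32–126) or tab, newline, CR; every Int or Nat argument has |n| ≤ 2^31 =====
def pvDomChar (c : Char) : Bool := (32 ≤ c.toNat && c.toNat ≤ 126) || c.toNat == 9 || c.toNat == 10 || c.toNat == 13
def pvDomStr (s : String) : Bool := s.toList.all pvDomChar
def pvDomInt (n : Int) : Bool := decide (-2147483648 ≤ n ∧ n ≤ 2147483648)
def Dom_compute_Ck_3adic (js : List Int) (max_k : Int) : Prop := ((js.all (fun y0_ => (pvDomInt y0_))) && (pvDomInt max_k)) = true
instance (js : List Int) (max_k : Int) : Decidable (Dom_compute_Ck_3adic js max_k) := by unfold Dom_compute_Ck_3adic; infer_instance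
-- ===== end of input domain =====

-- B replaces A's per-index recomputation of each suffix sum by a single reverse pass
-- extending one running suffix sum (objective: faster).

-- ===== PORT A =====
-- pow(b, e, m) for e ≥ 0: binary modular exponentiation, as CPython's built-in pow computes it
def pvPowMod (b : Int) (e : Nat) (m : Int) : Int :=
  if _h0 : e = 0 then PySem.Int.mod 1 m
  else
    let r := pvPowMod b (e / 2) m
    if e % 2 = 0 then PySem.Int.mod (r * r) m
    else PySem.Int.mod (r * r * b) m
decreasing_by exact Nat.div_lt_self (Nat.pos_of_ne_zero _h0) (by norm_num)

-- pow(2, -S, 3): for a negative exponent Python inverts the base mod m first;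
-- the inverse of 2 mod 3 is 2 itself, so 2^(-e) ≡ 2^e (mod 3) — exact for this call (base 2, modulus 3).
def pvPow2NegMod3 (S : Int) : Int :=
  if 0 ≤ -S then pvPowMod 2 (-S).toNat 3
  else pvPowMod 2 S.toNat 3

def compute_Ck_3adic (js : List Int) (max_k : Int) : List Int :=
  let k0 : Int := js.length
  let k : Int := if k0 > max_k then max_k else k0
  let js1 : List Int := if k0 > max_k then PySem.List.slice js none (some k) else js
  (PySem.List.pyRange 1 (k + 1) 1).foldl
    (fun digits i =>
      let S_i : Int := (PySem.List.slice js1 (some (k - i)) (some k)).sum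
      digits ++ [pvPow2NegMod3 S_i]) []

-- ===== PORT B =====
def compute_Ck_3adic_alt (js : List Int) (max_k : Int) : List Int :=
  let k0 : Int := min (js.length : Int) max_k
  let k : Int := if k0 < 0 then 0 else k0
  let pre : List Int := PySem.List.slice js none (some k)
  (pre.reverse.foldl
    (fun (st : List Int × Int) x =>
      (st.1 ++ [if PySem.Int.mod (st.2 + x) 2 = 0 then (1 : Int) else 2], st.2 + x))
    ([], 0)).1

-- ===== PRECONDITION & SPEC =====
def Spec_compute_Ck_3adic (js : List Int) (max_k : Int) (out : List Int) : Prop := out = compute_Ck_3adic_alt js max_k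
instance (js : List Int) (max_k : Int) (out : List Int) : Decidable (Spec_compute_Ck_3adic js max_k out) := by unfold Spec_compute_Ck_3adic; infer_instance

-- ===== CLAIM (what is proved, stated in full; the proofs are below) =====
def Claim_equal_compute_Ck_3adic : Prop := ∀ (js : List Int) (max_k : Int), Dom_compute_Ck_3adic js max_k → Spec_compute_Ck_3adic js max_k (compute_Ck_3adic js max_k)

-- ===== LEMMAS AND PROOFS =====

-- 2^e mod 3 depends only on the parity of e
lemma pvPowMod_two_three (e : Nat) : pvPowMod 2 e 3 = if e % 2 = 0 then 1 else 2 := by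
  induction e using Nat.strong_induction_on with
  | _ e ih =>
    rw [pvPowMod]
    by_cases h : e = 0
    · simp [h, PySem.Int.mod]
    · rw [dif_neg h]
      have hr := ih (e / 2) (Nat.div_lt_self (Nat.pos_of_ne_zero h) (by norm_num))
      rw [hr]
      by_cases hp : e % 2 = 0 <;> by_cases hq : (e / 2) % 2 = 0 <;>
        simp [hp, hq]

-- A's digit from a suffix sum S equals B's parity test on S
lemma pvPow2NegMod3_eq (S : Int) :
    pvPow2NegMod3 S = if PySem.Int.mod S 2 = 0 then (1 : Int) else 2 := by
  have hmod : PySem.Int.mod S 2 = S % 2 := PySem.Int.mod_eq_emod_of_pos (by norm_num)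
  unfold pvPow2NegMod3
  by_cases h1 : 0 ≤ -S
  · rw [if_pos h1, pvPowMod_two_three, hmod]; split_ifs <;> omega
  · rw [if_neg h1, pvPowMod_two_three, hmod]; split_ifs <;> omega

-- B's running-suffix-sum loop emits one digit per prefix of the reversed list
lemma bfold (h : Int → Int) (r : List Int) :
    ∀ (acc : List Int) (s : Int),
      (r.foldl (fun (st : List Int × Int) x => (st.1 ++ [h (st.2 + x)], st.2 + x)) (acc, s)).1
        = acc ++ (List.range r.length).map (fun j => h (s + (r.take (j + 1)).sum)) := by
  induction r with
  | nil => simp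
  | cons x t ih =>
      intro acc s
      simp only [List.foldl_cons, ih, List.length_cons, List.range_succ_eq_map,
        List.map_cons, List.map_map]
      simp [Function.comp_def, add_assoc, List.append_assoc]

-- both loops, run on the same (already truncated) list L (with k = len(L)), produce the same digits
lemma core_eq (L : List Int) (k : Int) (hk : k = (L.length : Int)) :
    (PySem.List.pyRange 1 (k + 1) 1).foldl
      (fun digits i =>
        digits ++ [pvPow2NegMod3 ((PySem.List.slice L (some (k - i)) (some k)).sum)]) []
      =
    (L.reverse.foldl
      (fun (st : List Int × Int) x =>
        (st.1 ++ [if PySem.Int.mod (st.2 + x) 2 = 0 then (1 : Int) else 2], st.2 + x))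
      ([], 0)).1 := by
  subst hk
  rw [PySem.List.foldl_append_singleton_eq_map,
      bfold (fun s => if PySem.Int.mod s 2 = 0 then (1 : Int) else 2) L.reverse,
      PySem.List.pyRange_one]
  simp only [List.nil_append, List.length_reverse, List.map_map]
  have hn : ((L.length : Int) + 1 - 1).toNat = L.length := by omega
  rw [hn]
  apply List.map_congr_left
  intro j hj
  rw [List.mem_range] at hj
  simp only [Function.comp_apply, zero_add]
  have h1 : ((L.length : Int) - (1 + (j : Int))) = ((L.length - (j + 1) : Nat) : Int) := by
    omega
  rw [h1, PySem.List.slice_natCast, pvPow2NegMod3_eq]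
  congr 2
  rw [List.take_reverse, List.sum_reverse_int]
  congr 1
  have h2 : L.length - (L.length - (j + 1)) = j + 1 := by omega
  rw [h2]
  congr 1
  apply List.take_of_length_le
  simp
  omega

-- ===== VERDICT (by name: the statement is the Claim_ definition above) =====
theorem compute_Ck_3adic_spec : Claim_equal_compute_Ck_3adic := by
  intro js max_k _
  unfold Spec_compute_Ck_3adic compute_Ck_3adic compute_Ck_3adic_alt
  by_cases h : (js.length : Int) > max_k
  · simp only [h, if_true, min_eq_right (le_of_lt h)]
    by_cases hneg : max_k < 0
    · rw [PySem.List.pyRange_one_eq_nil (by omega)]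
      simp only [hneg, if_true]
      rw [PySem.List.slice_to js (le_refl (0 : Int))]
      simp
    · rw [not_lt] at hneg
      simp only [not_lt.mpr hneg, if_false]
      refine core_eq _ max_k ?_
      rw [PySem.List.slice_to js hneg]
      simp
      omega
  · rw [gt_iff_lt, not_lt] at h
    simp only [gt_iff_lt, not_lt.mpr h, min_eq_left h, if_false]
    have hnn : (0 : Int) ≤ (js.length : Int) := by positivity
    have : ¬ ((js.length : Int) < 0) := by omega
    simp only [this, if_false]
    rw [PySem.List.slice_to js hnn]
    simp only [Int.toNat_natCast, List.take_length]
    exact core_eq js (js.length : Int) rfl
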